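-- pv_equiv track=rewrite | github.com/WilliamsLiang/DeepModelforIR | model/dssm.py | get_wordhashing
-- ===== SOURCE A (Python) =====
-- def get_tokenindex(token):
--     index = 0
--     for i in range(len(token)):
--         s = token[i]
--         if(s=="#"):
--             index = index + 27*(27**i)
--         else:
--             value = ord(s)-96
--             index = index + value*(27**i)
--     return index
--
-- def get_wordhashing(token_list):
--     index_dict = {}
--     index_list = []
--     value_list = []
--     for token in token_list:
--         index = get_tokenindex(token)
--         index_dict[index] = index_dict.get(index,len(index_dict.keys()))
--         if(index_dict[index]>=len(value_list)):
--             value_list.append(0)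
--         value_list[index_dict[index]] = value_list[index_dict[index]]+1
--     index_list = [0]*len(index_dict.keys())
--     for key in index_dict.keys():
--         index_list[index_dict[key]] = key
--     return index_list,value_list
-- ===== SOURCE B (Python) =====
-- def get_tokenindex(token):
--     return sum((27 if s == "#" else ord(s) - 96) * 27**i
--                for i, s in enumerate(token))
--
-- def _bisect_left(a, x):
--     lo, hi = 0, len(a)
--     while lo < hi:
--         mid = (lo + hi) // 2
--         if a[mid] < x:
--             lo = mid + 1
--         else:
--             hi = mid
--     return lo
--
-- def _bisect_right(a, x):
--     lo, hi = 0, len(a)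
--     while lo < hi:
--         mid = (lo + hi) // 2
--         if x < a[mid]:
--             hi = mid
--         else:
--             lo = mid + 1
--     return lo
--
-- def get_wordhashing(token_list):
--     indices = [get_tokenindex(t) for t in token_list]
--     index_list = list(dict.fromkeys(indices))
--     srt = sorted(indices)
--     value_list = [_bisect_right(srt, k) - _bisect_left(srt, k) for k in index_list]
--     return index_list, value_list
-- ===== Notes on version B (the rewrite author's own statement) =====
-- stated objective: alternative
-- what changed: Replaces A's incremental state machine (position-mapping dict, growing value list with an append-guard branch, and a second rebuild loop) by staged passes with no counting dict: map tokens to indices, dedup to first-occurrence order, sort the indices once, and read each count off the sorted list as bisect_right - bisect_left.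
import Mathlib
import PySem

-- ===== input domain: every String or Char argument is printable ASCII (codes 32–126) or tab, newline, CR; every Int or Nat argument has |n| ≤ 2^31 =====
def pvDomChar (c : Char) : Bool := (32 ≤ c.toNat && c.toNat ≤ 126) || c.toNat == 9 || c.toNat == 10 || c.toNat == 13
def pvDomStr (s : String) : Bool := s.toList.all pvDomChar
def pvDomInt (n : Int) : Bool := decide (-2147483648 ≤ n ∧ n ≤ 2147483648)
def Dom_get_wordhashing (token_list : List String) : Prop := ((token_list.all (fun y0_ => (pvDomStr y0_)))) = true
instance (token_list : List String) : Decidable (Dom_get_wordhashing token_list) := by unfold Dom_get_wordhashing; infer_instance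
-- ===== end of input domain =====

-- B replaces A's incremental state machine (position dict, growing value list with append guard,
-- second rebuild loop) by staged passes: map to indices, dedup, sort once, counts by binary search; objective: alternative.

-- ===== PORT A =====
def get_tokenindex (token : String) : Int :=
  let cs := token.toList
  (List.range cs.length).foldl (fun index i =>
    let s := cs.getD i ' '
    if s = '#' then index + 27 * 27 ^ i
    else index + ((s.toNat : Int) - 96) * 27 ^ i) 0

def get_wordhashing (token_list : List String) : List Int × List Int :=
  let st := token_list.foldl (fun st token =>
    let index := get_tokenindex token
    let pos := st.1.getD index (st.1.keys.length : Int)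
    let d := st.1.insert index pos
    let vl := if pos ≥ (st.2.length : Int) then st.2 ++ [(0 : Int)] else st.2
    (d, PySem.List.pySetD vl pos (PySem.List.pyGetD vl pos 0 + 1)))
    ((PySem.Dict.empty : PySem.Dict Int Int), ([] : List Int))
  let index_list := st.1.keys.foldl (fun il key =>
    PySem.List.pySetD il (st.1.getD key 0) key)
    (List.replicate st.1.keys.length (0 : Int))
  (index_list, st.2)

-- ===== PORT B =====
def get_tokenindex_alt (token : String) : Int :=
  ((PySem.List.enumerate token.toList).map (fun p =>
    (if p.2 = '#' then (27 : Int) else (p.2.toNat : Int) - 96) * 27 ^ p.1.toNat)).sum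

-- _bisect_left / _bisect_right in Source B are the textbook loops; PySem.List.bisectLeft / bisectRight
-- are that exact loop (lo/hi halving with (lo+hi)//2), so the port cites them.
def get_wordhashing_alt (token_list : List String) : List Int × List Int :=
  let indices := token_list.map get_tokenindex_alt
  let index_list := PySem.List.dedup indices     -- list(dict.fromkeys(indices))
  let srt := PySem.List.sorted indices (fun x => x) false
  (index_list, index_list.map (fun k =>
    (PySem.List.bisectRight srt k : Int) - (PySem.List.bisectLeft srt k : Int)))

-- ===== PRECONDITION & SPEC =====
def Spec_get_wordhashing (token_list : List String) (out : List Int × List Int) : Prop := out = get_wordhashing_alt token_list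
instance (token_list : List String) (out : List Int × List Int) : Decidable (Spec_get_wordhashing token_list out) := by unfold Spec_get_wordhashing; infer_instance

-- ===== CLAIM (what is proved, stated in full; the proofs are below) =====
def Claim_equal_get_wordhashing : Prop := ∀ (token_list : List String), Dom_get_wordhashing token_list → Spec_get_wordhashing token_list (get_wordhashing token_list)

-- ===== LEMMAS AND PROOFS =====
theorem tok_eq_list (cs : List Char) :
    (List.range cs.length).foldl (fun index i =>
      let s := cs.getD i ' '
      if s = '#' then index + 27 * 27 ^ i
      else index + ((s.toNat : Int) - 96) * 27 ^ i) 0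
    = ((PySem.List.enumerate cs).map (fun p =>
        (if p.2 = '#' then (27 : Int) else (p.2.toNat : Int) - 96) * 27 ^ p.1.toNat)).sum := by
  induction cs using List.reverseRecOn with
  | nil => rfl
  | append_singleton xs x ih =>
    rw [List.length_append, List.length_singleton, List.range_succ, List.foldl_append,
        PySem.List.enumerate_append]
    simp only [List.map_append, List.sum_append]
    rw [← ih]
    have hcongr : (List.range xs.length).foldl (fun index i =>
        let s := (xs ++ [x]).getD i ' '
        if s = '#' then index + 27 * 27 ^ i
        else index + ((s.toNat : Int) - 96) * 27 ^ i) 0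
      = (List.range xs.length).foldl (fun index i =>
        let s := xs.getD i ' '
        if s = '#' then index + 27 * 27 ^ i
        else index + ((s.toNat : Int) - 96) * 27 ^ i) 0 := by
      apply PySem.List.foldl_congr_mem
      intro acc i hi
      have hlt : i < xs.length := List.mem_range.mp hi
      simp [List.getElem?_append_left hlt, List.getElem?_eq_getElem hlt]
    rw [hcongr]
    have hx : (xs ++ [x]).getD xs.length ' ' = x := by
      simp
    simp only [List.foldl_cons, List.foldl_nil, hx]
    simp only [PySem.List.enumerate, List.map_cons, List.map_nil, List.sum_cons, List.sum_nil]
    by_cases hx' : x = '#' <;> simp [hx']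

theorem tok_eq (token : String) : get_tokenindex token = get_tokenindex_alt token := by
  simpa [get_tokenindex, get_tokenindex_alt] using tok_eq_list token.toList

-- proof-side abbreviations: A's loop body and the dict it builds
def stepA (st : PySem.Dict Int Int × List Int) (index : Int) : PySem.Dict Int Int × List Int :=
    let pos := st.1.getD index (st.1.keys.length : Int)
    let d := st.1.insert index pos
    let vl := if pos ≥ (st.2.length : Int) then st.2 ++ [(0 : Int)] else st.2
    (d, PySem.List.pySetD vl pos (PySem.List.pyGetD vl pos 0 + 1))

def dictOf (ks : List Int) : PySem.Dict Int Int :=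
  PySem.Dict.mk ((PySem.List.enumerate ks).map (fun p => (p.2, p.1)))

theorem keys_dictOf (ks : List Int) : (dictOf ks).keys = ks := by
  simp only [dictOf, PySem.Dict.keys, List.map_map]
  exact PySem.List.map_snd_enumerate ks 0

theorem getD_dictOf_not_mem (ks : List Int) (i d0 : Int) (h : i ∉ ks) :
    (dictOf ks).getD i d0 = d0 := by
  apply PySem.Dict.getD_of_not_contains
  rw [PySem.Dict.contains_eq_decide_mem_keys, keys_dictOf]
  simp [h]

theorem getD_dictOf_at (ks : List Int) (hnd : ks.Nodup) (j : Nat) (hj : j < ks.length) (d0 : Int) :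
    (dictOf ks).getD ks[j] d0 = (j : Int) := by
  apply PySem.Dict.getD_of_mem_items
  · show (ks[j], (j : Int)) ∈ (PySem.List.enumerate ks).map (fun p => (p.2, p.1))
    have : ((j : Int), ks[j]) ∈ PySem.List.enumerate ks := by
      rw [PySem.List.mem_enumerate_iff]
      exact ⟨j, hj, by simp⟩
    exact List.mem_map.mpr ⟨_, this, rfl⟩
  · rw [keys_dictOf]; exact hnd

theorem A_loop (L : List Int) :
    L.foldl stepA ((PySem.Dict.empty : PySem.Dict Int Int), ([] : List Int))
    = (dictOf (PySem.Set.ofList L),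
       (PySem.Set.ofList L).map (fun k => (L.count k : Int))) := by
  induction L using List.reverseRecOn with
  | nil => rfl
  | append_singleton L i ih =>
    rw [List.foldl_append, List.foldl_cons, List.foldl_nil, ih]
    have hnd : (PySem.Set.ofList L).Nodup := PySem.Set.nodup_ofList L
    set ks := PySem.Set.ofList L with hks
    by_cases hm : i ∈ L
    · -- existing key
      have hmk : i ∈ ks := (PySem.Set.mem_ofList (y := i) (xs := L)).mpr hm
      obtain ⟨j, hj, hgj⟩ := List.mem_iff_getElem.mp hmk
      have hpos : (dictOf ks).getD i ((dictOf ks).keys.length : Int) = (j : Int) := by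
        rw [← hgj]; exact getD_dictOf_at ks hnd j hj _
      have hset : PySem.Set.ofList (L ++ [i]) = ks := by
        rw [PySem.Set.ofList_append_singleton, ← hks, PySem.Set.add_of_mem hmk]
      have hlen : (ks.map (fun k => (L.count k : Int))).length = ks.length := by simp
      have hcont : (dictOf ks).contains i = true := by
        rw [PySem.Dict.contains_eq_decide_mem_keys, keys_dictOf]; simp [hmk]
      simp only [stepA, hpos, hset, hlen]
      rw [if_neg (by omega)]
      simp only [Prod.mk.injEq]
      constructor
      · -- inserting the existing position is the identity
        apply PySem.Dict.ext
        rw [PySem.Dict.items_insert_of_contains _ _ hcont]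
        conv_rhs => rw [← List.map_id ((dictOf ks).items)]
        apply List.map_congr_left
        intro p hp
        simp only [dictOf] at hp
        obtain ⟨q, hq, rfl⟩ := List.mem_map.mp hp
        obtain ⟨k, hk, rfl⟩ := (PySem.List.mem_enumerate_iff _ _ _).mp hq
        by_cases hki : ks[k] = i
        · have : k = j := (List.Nodup.getElem_inj_iff hnd).mp (hki.trans hgj.symm)
          subst this
          simp [hki]
        · simp [hki]
      · -- the count at position j goes up by one
        rw [PySem.List.pySetD_natCast, PySem.List.pyGetD_natCast]
        have hget : (ks.map (fun k => (L.count k : Int))).getD j 0 = (L.count i : Int) := by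
          rw [List.getD_eq_getElem _ _ (by simpa using hj)]
          simp [hgj]
        rw [hget]
        apply List.ext_getElem (by simp)
        intro p hp hp'
        have hpk : p < ks.length := by simpa using hp'
        rw [List.getElem_set, List.getElem_map, List.getElem_map]
        by_cases hpj : p = j
        · subst hpj
          simp [hgj, List.count_append]
        · have hne : ks[p] ≠ i := by
            rw [← hgj]
            intro h
            exact hpj ((List.Nodup.getElem_inj_iff hnd).mp h)
          rw [if_neg (fun h => hpj h.symm)]
          simp only [List.count_append, List.count_singleton]
          rw [if_neg (fun h : (i == ks[p]) = true => hne (beq_iff_eq.mp h).symm), Nat.add_zero]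
    · -- new key
      have hmk : i ∉ ks := fun h => hm ((PySem.Set.mem_ofList (y := i) (xs := L)).mp h)
      have hpos : (dictOf ks).getD i ((dictOf ks).keys.length : Int) = (ks.length : Int) := by
        rw [getD_dictOf_not_mem ks i _ hmk, keys_dictOf]
      have hset : PySem.Set.ofList (L ++ [i]) = ks ++ [i] := by
        rw [PySem.Set.ofList_append_singleton, ← hks, PySem.Set.add_of_not_mem hmk]
      have hlen : (ks.map (fun k => (L.count k : Int))).length = ks.length := by simp
      have hcont : (dictOf ks).contains i = false := by
        rw [PySem.Dict.contains_eq_decide_mem_keys, keys_dictOf]; simp [hmk]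
      simp only [stepA, hpos, hset, hlen]
      rw [if_pos (le_refl _)]
      simp only [Prod.mk.injEq]
      constructor
      · -- a fresh key is appended at position ks.length
        apply PySem.Dict.ext
        rw [PySem.Dict.items_insert_of_not_contains _ _ hcont]
        show _ = (PySem.List.enumerate (ks ++ [i])).map (fun p => (p.2, p.1))
        rw [PySem.List.enumerate_append]
        simp [dictOf, PySem.List.enumerate]
      · -- the value list gains a fresh count 1 at the end
        rw [PySem.List.pySetD_natCast, PySem.List.pyGetD_natCast]
        have hget : ((ks.map (fun k => (L.count k : Int)) ++ [0])).getD ks.length 0 = 0 := by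
          rw [show ks.length = (ks.map (fun k => (L.count k : Int))).length from hlen.symm]
          simp [List.getD_eq_getElem?_getD]
        rw [hget]
        rw [show ks.length = (ks.map (fun k => (L.count k : Int))).length from hlen.symm]
        simp only [List.map_append]
        rw [show ((ks.map (fun k => (L.count k : Int))) ++ [(0:Int)]).set
              (ks.map (fun k => (L.count k : Int))).length (0 + 1)
            = (ks.map (fun k => (L.count k : Int))) ++ [(0:Int) + 1] from by simp]
        congr 1
        · apply List.map_congr_left
          intro k hk
          have hki : k ≠ i := fun h => hmk (h ▸ hk)
          simp only [List.count_append, List.count_singleton]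
          rw [if_neg (fun h : (i == k) = true => hki (beq_iff_eq.mp h).symm), Nat.add_zero]
        · simp [List.count_append, List.count_singleton, List.count_eq_zero_of_not_mem hm]

theorem setfold_append (pos : Int → Int) (ks il : List Int) (y : Int)
    (h : ∀ k ∈ ks, ∃ j : Nat, pos k = (j : Int) ∧ j < il.length) :
    ks.foldl (fun il k => PySem.List.pySetD il (pos k) k) (il ++ [y])
    = ks.foldl (fun il k => PySem.List.pySetD il (pos k) k) il ++ [y] := by
  induction ks generalizing il with
  | nil => rfl
  | cons k ks ih =>
    obtain ⟨j, hpj, hjl⟩ := h k List.mem_cons_self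
    rw [List.foldl_cons, List.foldl_cons, hpj, PySem.List.pySetD_natCast,
        PySem.List.pySetD_natCast, List.set_append_left _ _ hjl]
    apply ih
    intro k' hk'
    obtain ⟨j', hj', hjl'⟩ := h k' (List.mem_cons_of_mem _ hk')
    exact ⟨j', hj', by simpa using hjl'⟩

theorem rebuild (pos : Int → Int) (ks : List Int)
    (h : ∀ j : Nat, (hj : j < ks.length) → pos ks[j] = (j : Int)) :
    ks.foldl (fun il k => PySem.List.pySetD il (pos k) k) (List.replicate ks.length 0) = ks := by
  induction ks using List.reverseRecOn with
  | nil => rfl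
  | append_singleton ks x ih =>
    have hn : ks.length < (ks ++ [x]).length := by simp
    have hx : pos x = (ks.length : Int) := by
      have := h ks.length hn
      simpa using this
    rw [List.length_append, List.length_singleton, List.replicate_succ' , List.foldl_append,
        setfold_append, List.foldl_cons, List.foldl_nil]
    · rw [ih]
      · rw [hx, PySem.List.pySetD_natCast]
        rw [show ks.length = (ks ++ [(0:Int)]).length - 1 from by simp]
        simp
      · intro j hj
        have := h j (by simp; omega)
        simpa [List.getElem_append_left hj] using this
    · intro k hk
      obtain ⟨j, hj, hgj⟩ := List.mem_iff_getElem.mp hk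
      refine ⟨j, ?_, by simpa using hj⟩
      have := h j (by simp; omega)
      rw [← hgj]
      simpa [List.getElem_append_left hj] using this

-- counts read off a sorted list by the two binary searches
theorem count_window (l : List Int) (k : Int) (hs : l.Pairwise (fun a b => a ≤ b)) :
    (PySem.List.bisectRight l k : Int) - (PySem.List.bisectLeft l k : Int) = (l.count k : Int) := by
  obtain ⟨hpl, hplt, hpge⟩ := PySem.List.bisectLeft_spec l k hs
  obtain ⟨hql, hqle, hqgt⟩ := PySem.List.bisectRight_spec l k hs
  set p := PySem.List.bisectLeft l k with hp
  set q := PySem.List.bisectRight l k with hq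
  have hpq : p ≤ q := by
    by_contra h
    have h' : q < p := by omega
    have hqlen : q < l.length := lt_of_lt_of_le h' hpl
    have h1 : l[q] < k := hplt q hqlen h'
    have h2 : k < l[q] := hqgt q hqlen le_rfl
    omega
  have hdec : l = l.take p ++ ((l.drop p).take (q - p) ++ l.drop q) := by
    rw [show l.drop q = (l.drop p).drop (q - p) by rw [List.drop_drop]; congr 1; omega,
        List.take_append_drop, List.take_append_drop]
  have hc1 : (l.take p).count k = 0 := by
    rw [List.count_eq_zero]
    intro hmem
    obtain ⟨i, hi, hgi⟩ := List.getElem_of_mem hmem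
    rw [List.length_take] at hi
    have hip : i < p := by omega
    have hil : i < l.length := by omega
    rw [List.getElem_take] at hgi
    have := hplt i hil hip
    omega
  have hc3 : (l.drop q).count k = 0 := by
    rw [List.count_eq_zero]
    intro hmem
    obtain ⟨i, hi, hgi⟩ := List.getElem_of_mem hmem
    rw [List.length_drop] at hi
    rw [List.getElem_drop] at hgi
    have := hqgt (q + i) (by omega) (by omega)
    omega
  have hc2 : ((l.drop p).take (q - p)).count k = q - p := by
    have hlen : ((l.drop p).take (q - p)).length = q - p := by
      rw [List.length_take, List.length_drop]; omega
    rw [show ((l.drop p).take (q - p)).count k = ((l.drop p).take (q - p)).length from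
      List.count_eq_length.mpr ?_, hlen]
    intro b hb
    obtain ⟨i, hi, hgi⟩ := List.getElem_of_mem hb
    rw [hlen] at hi
    rw [List.getElem_take, List.getElem_drop] at hgi
    have h1 : k ≤ l[p + i] := hpge (p + i) (by omega) (by omega)
    have h2 : l[p + i] ≤ k := hqle (p + i) (by omega) (by omega)
    have : b = k := by omega
    simp [this]
  have : l.count k = q - p := by
    conv_lhs => rw [hdec]
    rw [List.count_append, List.count_append, hc1, hc2, hc3]
    omega
  rw [this]
  omega

theorem get_wordhashing_eq_alt (token_list : List String) :
    get_wordhashing token_list = get_wordhashing_alt token_list := by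
  unfold get_wordhashing get_wordhashing_alt
  have hA : token_list.foldl (fun st token =>
      let index := get_tokenindex token
      let pos := st.1.getD index (st.1.keys.length : Int)
      let d := st.1.insert index pos
      let vl := if pos ≥ (st.2.length : Int) then st.2 ++ [(0 : Int)] else st.2
      (d, PySem.List.pySetD vl pos (PySem.List.pyGetD vl pos 0 + 1)))
      ((PySem.Dict.empty : PySem.Dict Int Int), ([] : List Int))
      = (token_list.map get_tokenindex_alt).foldl stepA (PySem.Dict.empty, []) := by
    rw [List.foldl_map]
    simp only [stepA, tok_eq]
  simp only [hA]
  set L := token_list.map get_tokenindex_alt with hL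
  rw [A_loop]
  have hdedup : PySem.List.dedup L = PySem.Set.ofList L := rfl
  rw [hdedup]
  set srt := PySem.List.sorted L (fun x => x) false with hsrt
  have hperm : srt.Perm L := PySem.List.sorted_perm L (fun x => x) false
  have hpair : srt.Pairwise (fun a b => a ≤ b) := PySem.List.sorted_pairwise L (fun x => x)
  dsimp only
  simp only [keys_dictOf]
  refine Prod.ext ?_ ?_
  · -- index lists
    apply rebuild
    intro j hj
    exact getD_dictOf_at _ (PySem.Set.nodup_ofList L) j hj 0
  · -- value lists
    apply List.map_congr_left
    intro k hk
    rw [count_window srt k hpair, hperm.count_eq]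

-- ===== VERDICT (by name: the statement is the Claim_ definition above) =====
theorem get_wordhashing_spec : Claim_equal_get_wordhashing := by
  intro token_list _
  unfold Spec_get_wordhashing
  exact get_wordhashing_eq_alt token_list
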